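-- pv_equiv track=rewrite | github.com/TheFrancho/papers-scrapper-agent | src/papers2code/tools/modality.py | guess_modality
-- ===== SOURCE A (Python) =====
-- from typing import List, Dict, Literal
--
-- Modality = Literal["tabular", "images", "text", "timeseries", "unknown"]
--
-- def guess_modality(files: List[Dict]) -> Modality:
--     names = [ (f.get("name") or "").lower() for f in files ]
--     if any(n.endswith((".csv", ".parquet")) for n in names):
--         return "tabular"
--
--     # CIFAR mirrors often expose batch files OR class folders
--     if any(n.startswith("data_batch_") or n == "test_batch" for n in names):
--         return "images"
--     if any(n.endswith((".png", ".jpg", ".jpeg")) for n in names):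
--         return "images"
--     if any("train/" in n or "test/" in n for n in names):
--         return "images"
--     return "unknown"
-- ===== SOURCE B (Python) =====
-- def guess_modality(files):
--     has_tabular = False
--     has_image = False
--     for f in files:
--         n = (f.get("name") or "").lower()
--         if n.endswith(".csv") or n.endswith(".parquet"):
--             has_tabular = True
--         elif (n.startswith("data_batch_") or n == "test_batch"
--               or n.endswith(".png") or n.endswith(".jpg") or n.endswith(".jpeg")
--               or "train/" in n or "test/" in n):
--             has_image = True
--     if has_tabular:
--         return "tabular"
--     if has_image:
--         return "images"
--     return "unknown"
-- ===== Notes on version B (the rewrite author's own statement) =====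
-- stated objective: alternative
-- what changed: Replaces the names list plus four separate any() scans with a single loop over the files that maintains two boolean flags (tabular seen / image-pattern seen) and decides by priority after the pass.
import Mathlib
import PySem

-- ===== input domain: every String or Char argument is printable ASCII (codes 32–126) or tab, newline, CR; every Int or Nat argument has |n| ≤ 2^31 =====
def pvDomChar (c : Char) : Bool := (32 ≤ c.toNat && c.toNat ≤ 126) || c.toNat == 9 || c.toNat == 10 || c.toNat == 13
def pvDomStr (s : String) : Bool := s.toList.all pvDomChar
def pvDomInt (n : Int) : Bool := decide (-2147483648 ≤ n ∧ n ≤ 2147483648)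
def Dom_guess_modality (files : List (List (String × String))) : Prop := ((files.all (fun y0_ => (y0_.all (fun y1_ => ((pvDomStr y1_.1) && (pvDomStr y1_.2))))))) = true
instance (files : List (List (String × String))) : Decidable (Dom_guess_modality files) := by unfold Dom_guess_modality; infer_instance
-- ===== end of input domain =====

-- ===== PORT A =====
-- Header: B replaces the four separate any() scans of A by one pass over the files maintaining two flags; same return values.
def nameOf (f : List (String × String)) : String :=
  PySem.Str.lower (((PySem.Dict.mk f).get? "name").getD "")

def isTab (n : String) : Bool :=
  PySem.Str.endswith n ".csv" || PySem.Str.endswith n ".parquet"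

def isImg1 (n : String) : Bool :=
  PySem.Str.startswith n "data_batch_" || n == "test_batch"

def isImg2 (n : String) : Bool :=
  PySem.Str.endswith n ".png" || PySem.Str.endswith n ".jpg" || PySem.Str.endswith n ".jpeg"

def isImg3 (n : String) : Bool :=
  PySem.Str.isIn "train/" n || PySem.Str.isIn "test/" n

def guess_modality (files : List (List (String × String))) : String :=
  let names := files.map nameOf
  if names.any isTab then "tabular"
  else if names.any isImg1 then "images"
  else if names.any isImg2 then "images"
  else if names.any isImg3 then "images"
  else "unknown"

-- ===== PORT B =====
def altStep (st : Bool × Bool) (f : List (String × String)) : Bool × Bool :=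
  let n := nameOf f
  if isTab n then (true, st.2)
  else if isImg1 n || isImg2 n || isImg3 n then (st.1, true)
  else st

def guess_modality_alt (files : List (List (String × String))) : String :=
  let st := files.foldl altStep (false, false)
  if st.1 then "tabular" else if st.2 then "images" else "unknown"

-- ===== PRECONDITION & SPEC =====
def Spec_guess_modality (files : List (List (String × String))) (out : String) : Prop := out = guess_modality_alt files
instance (files : List (List (String × String))) (out : String) : Decidable (Spec_guess_modality files out) := by unfold Spec_guess_modality; infer_instance

-- ===== CLAIM (what is proved, stated in full; the proofs are below) =====
def Claim_equal_guess_modality : Prop := ∀ (files : List (List (String × String))), Dom_guess_modality files → Spec_guess_modality files (guess_modality files)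

-- ===== LEMMAS AND PROOFS =====
def isImg (n : String) : Bool := isImg1 n || isImg2 n || isImg3 n

theorem altStep_foldl (files : List (List (String × String))) (a b : Bool) :
    files.foldl altStep (a, b) =
      (a || (files.map nameOf).any isTab,
       b || (files.map nameOf).any (fun n => !isTab n && isImg n)) := by
  induction files generalizing a b with
  | nil => simp
  | cons f fs ih =>
    simp only [List.foldl_cons, List.map_cons, List.any_cons, altStep]
    have hI : (isImg1 (nameOf f) || isImg2 (nameOf f) || isImg3 (nameOf f)) = isImg (nameOf f) := rfl
    rw [hI]
    by_cases h : isTab (nameOf f)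
    · simp [h, ih]
    · by_cases h2 : isImg (nameOf f) <;> simp [h, h2, ih]

theorem any_img_of_no_tab (ns : List String) (h : ns.any isTab = false) :
    ns.any (fun n => !isTab n && isImg n) = ns.any isImg := by
  induction ns with
  | nil => rfl
  | cons n ns ih =>
    simp only [List.any_cons, Bool.or_eq_false_iff] at h ⊢
    simp [h.1, ih h.2]

theorem any_isImg (ns : List String) :
    ns.any isImg = (ns.any isImg1 || ns.any isImg2 || ns.any isImg3) := by
  induction ns with
  | nil => rfl
  | cons n ns ih =>
    simp only [List.any_cons, ih, isImg]
    cases isImg1 n <;> cases isImg2 n <;> cases isImg3 n <;> simp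

-- ===== VERDICT (by name: the statement is the Claim_ definition above) =====
theorem guess_modality_spec : Claim_equal_guess_modality := by
  intro files _
  unfold Spec_guess_modality guess_modality guess_modality_alt
  rw [altStep_foldl]
  simp only [Bool.false_or]
  by_cases hT : (files.map nameOf).any isTab
  · simp [hT]
  · rw [any_img_of_no_tab _ (by simpa using hT), any_isImg]
    simp only [hT, if_false, Bool.false_eq_true]
    by_cases h1 : (files.map nameOf).any isImg1 <;>
    by_cases h2 : (files.map nameOf).any isImg2 <;>
    by_cases h3 : (files.map nameOf).any isImg3 <;>
      simp [h1, h2, h3]
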